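-- pv_equiv track=rewrite | github.com/jijae92/WinOcr | src/pdf_text_overlay/text_utils.py | dehyphenize
-- ===== SOURCE A (Python) =====
-- from typing import Iterable, List
--
-- def dehyphenize(lines: Iterable[str]) -> List[str]:
--     """Join hyphenated line endings according to simple rules."""
--     result: List[str] = []
--     buffer = ""
--     for line in lines:
--         segment = line.strip()
--         if not segment:
--             if buffer:
--                 result.append(buffer)
--                 buffer = ""
--             result.append("")
--             continue
--         if buffer.endswith("-") and segment and segment[0].islower():
--             buffer = buffer[:-1] + segment
--             continue
--         if buffer:
--             result.append(buffer)
--         buffer = segment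
--     if buffer:
--         result.append(buffer)
--     return result
-- ===== SOURCE B (Python) =====
-- from typing import Iterable, List
--
-- def dehyphenize(lines: Iterable[str]) -> List[str]:
--     """Join hyphenated line endings according to simple rules."""
--     result: List[str] = []
--     for line in lines:
--         segment = line.strip()
--         if not segment:
--             result.append("")
--         elif result and result[-1].endswith("-") and segment[0].islower():
--             result[-1] = result[-1][:-1] + segment
--         else:
--             result.append(segment)
--     return result
-- ===== Notes on version B (the rewrite author's own statement) =====
-- stated objective: simpler
-- what changed: B drops A's pending-buffer/flush state machine and builds the result list directly, committing each stripped line immediately and retroactively merging a hyphenated ending by rewriting the last committed element; no post-loop flush.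
import Mathlib
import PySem

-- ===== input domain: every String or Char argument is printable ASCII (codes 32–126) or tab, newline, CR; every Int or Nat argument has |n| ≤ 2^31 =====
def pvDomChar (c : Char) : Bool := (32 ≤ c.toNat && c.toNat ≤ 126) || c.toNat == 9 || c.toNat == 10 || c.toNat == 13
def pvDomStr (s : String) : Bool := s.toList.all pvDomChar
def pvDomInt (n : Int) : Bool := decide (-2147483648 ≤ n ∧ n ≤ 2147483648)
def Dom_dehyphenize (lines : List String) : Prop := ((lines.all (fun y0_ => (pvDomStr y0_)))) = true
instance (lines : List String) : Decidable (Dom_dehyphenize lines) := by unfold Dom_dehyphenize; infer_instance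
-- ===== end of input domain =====

-- B drops A's pending-buffer/flush state machine and appends each stripped line immediately,
-- merging a hyphenated ending by rewriting the last committed element (objective: simpler).

-- ===== PORT A =====
-- A's loop state: (result, buffer); branches in the Python order.
def dehyphenizeStepA (st : List String × String) (line : String) : List String × String :=
  let result := st.1
  let buffer := st.2
  let segment := PySem.Str.strip line
  if segment = "" then
    ((if buffer ≠ "" then result ++ [buffer] else result) ++ [""], "")
  else if PySem.Str.endswith buffer "-" && !(segment == "") &&
          (PySem.Str.pyGet? segment 0).elim false PySem.Chars.islower then
    (result, PySem.Str.slice buffer none (some (-1)) ++ segment)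
  else
    ((if buffer ≠ "" then result ++ [buffer] else result), segment)

def dehyphenize (lines : List String) : List String :=
  let st := lines.foldl dehyphenizeStepA ([], "")
  if st.2 ≠ "" then st.1 ++ [st.2] else st.1

-- ===== PORT B =====
-- B's loop state: just the result list; result[-1] is rewritten in the merge branch.
def dehyphenizeStepB (result : List String) (line : String) : List String :=
  let segment := PySem.Str.strip line
  if segment = "" then
    result ++ [""]
  else if !result.isEmpty &&
          (result.getLast?).elim false (fun last => PySem.Str.endswith last "-") &&
          (PySem.Str.pyGet? segment 0).elim false PySem.Chars.islower then
    result.dropLast ++ [PySem.Str.slice (result.getLast?.getD "") none (some (-1)) ++ segment]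
  else
    result ++ [segment]

def dehyphenize_alt (lines : List String) : List String :=
  lines.foldl dehyphenizeStepB []

-- ===== PRECONDITION & SPEC =====
def Spec_dehyphenize (lines : List String) (out : List String) : Prop := out = dehyphenize_alt lines
instance (lines : List String) (out : List String) : Decidable (Spec_dehyphenize lines out) := by unfold Spec_dehyphenize; infer_instance

-- ===== CLAIM (what is proved, stated in full; the proofs are below) =====
def Claim_equal_dehyphenize : Prop := ∀ (lines : List String), Dom_dehyphenize lines → Spec_dehyphenize lines (dehyphenize lines)

-- ===== LEMMAS AND PROOFS =====

-- A's state (res, buf) and B's state res' stay related: res' is res with the pending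
-- buffer (if any) already committed, and when buf = "" the last committed element is ""
-- (or nothing), so B's merge condition cannot fire.
def dehyphenizeInv (res : List String) (buf : String) (res' : List String) : Prop :=
  res' = res ++ (if buf = "" then [] else [buf]) ∧
  (buf = "" → res' = [] ∨ res'.getLast? = some "")

lemma endswith_nil_dash : PySem.Chars.endswith [] ['-'] = false := by decide

lemma dehyphenize_inv_step (res : List String) (buf : String) (res' : List String)
    (h : dehyphenizeInv res buf res') (line : String) :
    dehyphenizeInv (dehyphenizeStepA (res, buf) line).1 (dehyphenizeStepA (res, buf) line).2
      (dehyphenizeStepB res' line) := by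
  obtain ⟨h1, h2⟩ := h
  simp only [dehyphenizeStepA, dehyphenizeStepB]
  by_cases hseg : PySem.Str.strip line = ""
  · -- empty segment: both append ""
    simp only [hseg, if_pos]
    constructor
    · subst h1; by_cases hb : buf = "" <;> simp [hb]
    · intro _; right; simp
  · -- nonempty segment
    by_cases hb : buf = ""
    · -- buffer empty: A's merge test is false; B's too (last element is none or "")
      have hAcond : (PySem.Str.endswith buf "-" && !((PySem.Str.strip line) == "") &&
          (PySem.Str.pyGet? (PySem.Str.strip line) 0).elim false PySem.Chars.islower) = false := by
        simp [hb, endswith_nil_dash]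
      -- (endswith of the empty buffer is false)
      have hBcond : (!res'.isEmpty &&
          (res'.getLast?).elim false (fun last => PySem.Str.endswith last "-") &&
          (PySem.Str.pyGet? (PySem.Str.strip line) 0).elim false PySem.Chars.islower) = false := by
        rcases h2 hb with he | hl
        · simp [he]
        · simp [hl, endswith_nil_dash]
      simp only [if_neg hseg, hAcond, hBcond, Bool.false_eq_true, if_false]
      constructor
      · subst h1; simp [hb, hseg]
      · intro hc; exact absurd hc hseg
    · -- buffer nonempty: res' = res ++ [buf]; the two merge tests coincide
      have h1' : res' = res ++ [buf] := by simpa [hb] using h1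
      have hlast : res'.getLast? = some buf := by simp [h1']
      have hne : res'.isEmpty = false := by simp [h1']
      have hcond : (!res'.isEmpty &&
          (res'.getLast?).elim false (fun last => PySem.Str.endswith last "-") &&
          (PySem.Str.pyGet? (PySem.Str.strip line) 0).elim false PySem.Chars.islower) =
          (PySem.Str.endswith buf "-" && !((PySem.Str.strip line) == "") &&
          (PySem.Str.pyGet? (PySem.Str.strip line) 0).elim false PySem.Chars.islower) := by
        have hseg' : (PySem.Str.strip line == "") = false := beq_eq_false_iff_ne.mpr hseg
        simp [hne, hlast, hseg']
      by_cases hm : (PySem.Str.endswith buf "-" && !((PySem.Str.strip line) == "") &&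
          (PySem.Str.pyGet? (PySem.Str.strip line) 0).elim false PySem.Chars.islower) = true
      · -- merge branch on both sides
        simp only [if_neg hseg, hm, hcond, if_true]
        constructor
        · have hb2 : (PySem.Str.slice buf none (some (-1)) ++ PySem.Str.strip line) ≠ "" := by
            intro hc
            apply hseg
            have := congrArg String.toList hc
            simp only [String.toList_append] at this
            have : (PySem.Str.strip line).toList = [] := List.eq_nil_of_append_eq_nil this |>.2
            cases hs : PySem.Str.strip line
            simp_all
          simp [h1', hb2]
        · intro hc
          exfalso
          apply hseg
          have := congrArg String.toList hc
          simp only [String.toList_append] at this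
          have h0 : (PySem.Str.strip line).toList = [] := List.eq_nil_of_append_eq_nil this |>.2
          cases hs : PySem.Str.strip line
          simp_all
      · -- commit branch on both sides
        simp only [if_neg hseg, hcond, hm, Bool.false_eq_true, if_false]
        constructor
        · simp [h1', hb, hseg]
        · intro hc; exact absurd hc hseg

lemma dehyphenize_foldl (lines : List String) :
    ∀ (res : List String) (buf : String) (res' : List String),
      dehyphenizeInv res buf res' →
      dehyphenizeInv (lines.foldl dehyphenizeStepA (res, buf)).1
        (lines.foldl dehyphenizeStepA (res, buf)).2
        (lines.foldl dehyphenizeStepB res') := by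
  induction lines with
  | nil => intro res buf res' h; simpa using h
  | cons line rest ih =>
    intro res buf res' h
    have hstep := dehyphenize_inv_step res buf res' h line
    simpa using ih _ _ _ hstep

-- ===== VERDICT (by name: the statement is the Claim_ definition above) =====
theorem dehyphenize_spec : Claim_equal_dehyphenize := by
  intro lines _
  unfold Spec_dehyphenize dehyphenize dehyphenize_alt
  have h := dehyphenize_foldl lines [] "" [] (by constructor <;> simp)
  obtain ⟨h1, _⟩ := h
  by_cases hb : (lines.foldl dehyphenizeStepA ([], "")).2 = "" <;>
    simp_all
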